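-- pv_equiv track=rewrite | github.com/Cortega13/Legal-Rag | main/database_analyzer.py | combine_sections
-- ===== SOURCE A (Python) =====
-- from collections import defaultdict
--
-- def expand_sections(sections, range_=1):
--     expanded = set()
--     for sec in sections:
--         expanded.update(range(max(0, sec - range_), sec + range_ + 1))
--     return sorted(list(expanded))
--
-- def combine_sections(documents):
--     result_dict = defaultdict(list)
--     for title, section in documents:
--         result_dict[title].append(int(section))
--
--     for title, sections in result_dict.items():
--         result_dict[title] = expand_sections(sections)
--
--     result_list = [[title, sections] for title, sections in result_dict.items()]
--
--     return result_list
-- ===== SOURCE B (Python) =====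
-- def combine_sections(documents):
--     # Dedup titles in first-appearance order, then one filtered+sorted merge pass per title
--     # (interval merging instead of set-union + sort).
--     titles = list(dict.fromkeys(t for t, _ in documents))
--     result = []
--     for title in titles:
--         secs = sorted(int(s) for t, s in documents if t == title)
--         pts = []
--         last = -1
--         for sec in secs:
--             hi = sec + 1
--             lo = max(0, sec - 1, last + 1)
--             pts.extend(range(lo, hi + 1))
--             if hi > last:
--                 last = hi
--         result.append([title, pts])
--     return result
-- ===== Notes on version B (the rewrite author's own statement) =====
-- stated objective: alternative
-- what changed: B replaces A's defaultdict grouping plus set-union-and-sort expansion by deduplicating titles in first-appearance order and, per title, sorting the section numbers once and emitting the expanded points in a single left-to-right interval-merge pass (tracking the last emitted value), so no set and no final sort over the expanded points are needed.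
import Mathlib
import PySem

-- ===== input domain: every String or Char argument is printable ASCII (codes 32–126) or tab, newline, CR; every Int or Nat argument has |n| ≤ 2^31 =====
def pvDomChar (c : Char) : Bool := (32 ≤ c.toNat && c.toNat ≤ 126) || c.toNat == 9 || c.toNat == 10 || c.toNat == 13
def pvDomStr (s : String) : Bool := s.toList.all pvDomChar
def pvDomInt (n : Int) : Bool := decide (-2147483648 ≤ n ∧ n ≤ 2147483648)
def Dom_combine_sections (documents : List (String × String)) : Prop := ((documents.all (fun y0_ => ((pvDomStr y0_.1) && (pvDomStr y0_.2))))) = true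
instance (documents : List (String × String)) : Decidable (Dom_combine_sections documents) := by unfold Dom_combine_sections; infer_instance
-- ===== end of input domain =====

-- B replaces the set-union-then-sort expansion by a sorted single-pass interval merge (and the
-- dict group-by by dedup-titles + filter); same return value on all inputs where A returns.

-- ===== PORT A =====
-- int(section): PySem.Int.ofStr? (none = ValueError, excluded by Pre_; the .getD 0 is never reached there)
def pvParse (s : String) : Int := (PySem.Int.ofStr? s).getD 0

def expand_sections (sections : List Int) (range_ : Int) : List Int :=
  let expanded : PySem.Set Int :=
    sections.foldl
      (fun s sec => PySem.Set.update s (PySem.List.pyRange (max 0 (sec - range_)) (sec + range_ + 1) 1))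
      PySem.Set.empty
  PySem.List.sorted expanded (fun x => x)

def combine_sections (documents : List (String × String)) : List (String × List Int) :=
  -- result_dict after the first loop:
  let d1 := documents.foldl (fun d p => d.modify p.1 [] (fun l => l ++ [pvParse p.2])) PySem.Dict.empty
  -- second loop: result_dict[title] = expand_sections(sections) for each item; then the comprehension
  ((d1.items.foldl (fun d p => d.insert p.1 (expand_sections p.2 1)) d1).items)

-- ===== PORT B =====
def pvMergeStep (acc : List Int × Int) (sec : Int) : List Int × Int :=
  let hi := sec + 1
  let lo := max (max 0 (sec - 1)) (acc.2 + 1)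
  (acc.1 ++ PySem.List.pyRange lo (hi + 1) 1, if hi > acc.2 then hi else acc.2)

def combine_sections_alt (documents : List (String × String)) : List (String × List Int) :=
  (PySem.List.dedup (documents.map (fun p => p.1))).map (fun title =>
    (title, (((PySem.List.sorted ((documents.filter (fun p => p.1 == title)).map
        (fun p => pvParse p.2)) (fun x => x)).foldl pvMergeStep ([], -1))).1))

-- ===== PRECONDITION & SPEC =====
-- Pre_ excludes exactly the inputs where some section string is not an int literal: there Python's
-- int(section) raises ValueError, so A returns nothing to match.
def Pre_combine_sections (documents : List (String × String)) : Prop :=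
  (documents.all (fun p => (PySem.Int.ofStr? p.2).isSome)) = true
instance (documents : List (String × String)) : Decidable (Pre_combine_sections documents) := by
  unfold Pre_combine_sections; infer_instance

def pvWitness_combine_sections : (List (String × String)) := [("a", "3"), ("a", "7"), ("b", "-2"), ("b", "0")]

def Spec_combine_sections (documents : List (String × String)) (out : List (String × List Int)) : Prop := out = combine_sections_alt documents
instance (documents : List (String × String)) (out : List (String × List Int)) : Decidable (Spec_combine_sections documents out) := by unfold Spec_combine_sections; infer_instance

-- ===== CLAIM (what is proved, stated in full; the proofs are below) =====
def Claim_equal_combine_sections : Prop := ∀ (documents : List (String × String)), Dom_combine_sections documents → Pre_combine_sections documents → Spec_combine_sections documents (combine_sections documents)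

-- ===== LEMMAS AND PROOFS =====

-- the merge loop of B: invariant over the sorted section list
theorem pvMerge_inv : ∀ (l : List Int), l.Pairwise (· ≤ ·) → ∀ (out : List Int) (last : Int),
    out.Pairwise (· < ·) → (∀ x ∈ out, x ≤ last) →
    (∀ sec ∈ l, ∀ x : Int, max 0 (sec - 1) ≤ x → x ≤ last → x ∈ out) →
    (l.foldl pvMergeStep (out, last)).1.Pairwise (· < ·) ∧
    (∀ x : Int, x ∈ (l.foldl pvMergeStep (out, last)).1 ↔
        x ∈ out ∨ ∃ sec ∈ l, max 0 (sec - 1) ≤ x ∧ x ≤ sec + 1) := by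
  intro l
  induction l with
  | nil => intro _ out last h1 _ _; exact ⟨h1, fun x => by simp⟩
  | cons sec t ih =>
    intro hsorted out last h1 h2 h3
    have hsec_le : ∀ s' ∈ t, sec ≤ s' := fun s' hs' => (List.pairwise_cons.1 hsorted).1 s' hs'
    have htsort := (List.pairwise_cons.1 hsorted).2
    simp only [List.foldl_cons]
    set hi := sec + 1 with hhi
    set lo := max (max 0 (sec - 1)) (last + 1) with hlo
    have hstep : pvMergeStep (out, last) sec =
        (out ++ PySem.List.pyRange lo (hi + 1) 1, if hi > last then hi else last) := rfl
    rw [hstep]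
    set out' := out ++ PySem.List.pyRange lo (hi + 1) 1 with hout'
    set last' := if hi > last then hi else last with hlast'
    have hlast'_eq : last' = max last hi := by rw [hlast']; split <;> omega
    have h1' : out'.Pairwise (· < ·) := by
      rw [hout']
      refine List.pairwise_append.2 ⟨h1, PySem.List.pairwise_lt_pyRange_one _ _, ?_⟩
      intro a ha b hb
      have := h2 a ha
      have := (PySem.List.mem_pyRange_one.1 hb).1
      omega
    have h2' : ∀ x ∈ out', x ≤ last' := by
      intro x hx
      rcases List.mem_append.1 hx with hx | hx
      · have := h2 x hx; omega
      · have := (PySem.List.mem_pyRange_one.1 hx).2; omega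
    have h3' : ∀ s' ∈ t, ∀ x : Int, max 0 (s' - 1) ≤ x → x ≤ last' → x ∈ out' := by
      intro s' hs' x hx1 hx2
      by_cases hc : x ≤ last
      · exact List.mem_append_left _ (h3 s' (List.mem_cons_of_mem _ hs') x hx1 hc)
      · have hss := hsec_le s' hs'
        refine List.mem_append_right _ (PySem.List.mem_pyRange_one.2 ⟨by omega, by omega⟩)
    obtain ⟨g1, g2⟩ := ih htsort out' last' h1' h2' h3'
    refine ⟨g1, fun x => ?_⟩
    rw [g2 x]
    constructor
    · rintro (hx | ⟨s', hs', hi1, hi2⟩)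
      · rcases List.mem_append.1 hx with hx | hx
        · exact Or.inl hx
        · have := PySem.List.mem_pyRange_one.1 hx
          exact Or.inr ⟨sec, List.mem_cons_self, by omega, by omega⟩
      · exact Or.inr ⟨s', List.mem_cons_of_mem _ hs', hi1, hi2⟩
    · rintro (hx | ⟨s', hs', hi1, hi2⟩)
      · exact Or.inl (List.mem_append_left _ hx)
      · rcases List.mem_cons.1 hs' with rfl | hs'
        · by_cases hc : x ≤ last
          · exact Or.inl (List.mem_append_left _ (h3 s' List.mem_cons_self x hi1 hc))
          · exact Or.inl (List.mem_append_right _ (PySem.List.mem_pyRange_one.2 ⟨by omega, by omega⟩))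
        · exact Or.inr ⟨s', hs', hi1, hi2⟩

-- membership and nodup of A's set-union loop
theorem pvSetFold_mem (secs : List Int) (r : Int) (s0 : PySem.Set Int) (x : Int) :
    x ∈ secs.foldl (fun s sec => PySem.Set.update s (PySem.List.pyRange (max 0 (sec - r)) (sec + r + 1) 1)) s0 ↔
      x ∈ s0 ∨ ∃ sec ∈ secs, x ∈ PySem.List.pyRange (max 0 (sec - r)) (sec + r + 1) 1 := by
  induction secs generalizing s0 with
  | nil => simp
  | cons a t ih =>
    simp only [List.foldl_cons, ih, PySem.Set.mem_update, List.mem_cons]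
    constructor
    · rintro ((h|h)|⟨s,hs,h⟩)
      · exact Or.inl h
      · exact Or.inr ⟨a, Or.inl rfl, h⟩
      · exact Or.inr ⟨s, Or.inr hs, h⟩
    · rintro (h|⟨s,(rfl|hs),h⟩)
      · exact Or.inl (Or.inl h)
      · exact Or.inl (Or.inr h)
      · exact Or.inr ⟨s, hs, h⟩

theorem pvSetFold_nodup (secs : List Int) (r : Int) (s0 : PySem.Set Int) (h : s0.Nodup) :
    (secs.foldl (fun s sec => PySem.Set.update s (PySem.List.pyRange (max 0 (sec - r)) (sec + r + 1) 1)) s0).Nodup := by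
  induction secs generalizing s0 with
  | nil => exact h
  | cons a t ih => exact ih _ (PySem.Set.nodup_update _ _ h)

theorem pvExpand_eq_merge (secs : List Int) :
    expand_sections secs 1 = ((PySem.List.sorted secs (fun x => x)).foldl pvMergeStep ([], -1)).1 := by
  have hsorted : (PySem.List.sorted secs (fun x => x)).Pairwise (· ≤ ·) :=
    PySem.List.sorted_pairwise secs (fun x => x)
  obtain ⟨g1, g2⟩ := pvMerge_inv _ hsorted [] (-1) (by simp) (by simp)
    (by intro s _ x hx1 hx2; omega)
  unfold expand_sections
  refine PySem.List.sorted_eq_of_perm_of_pairwise_lt _ _ _ ?_ g1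
  refine (List.perm_ext_iff_of_nodup (g1.imp ne_of_lt) (pvSetFold_nodup _ _ _ List.nodup_nil)).2 ?_
  intro x
  rw [g2 x, pvSetFold_mem]
  simp only [List.not_mem_nil, false_or, PySem.List.mem_pyRange_one, PySem.List.mem_sorted]
  constructor
  · rintro ⟨s, hs, h1, h2⟩; exact ⟨s, hs, by omega, by omega⟩
  · rintro ⟨s, hs, h1, h2⟩; exact ⟨s, hs, by omega, by omega⟩

-- phase 1: A's grouping dict, itemised
theorem pvPhase1_items (documents : List (String × String)) :
    (documents.foldl (fun d p => d.modify p.1 [] (fun l => l ++ [pvParse p.2])) PySem.Dict.empty).items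
      = (PySem.List.dedup (documents.map (fun p => p.1))).map
          (fun t => (t, (documents.filter (fun p => p.1 == t)).map (fun p => pvParse p.2))) := by
  set d1 := documents.foldl (fun d p => d.modify p.1 [] (fun l => l ++ [pvParse p.2])) PySem.Dict.empty with hd1
  have hkeys : d1.keys = PySem.Set.update (PySem.Dict.empty : PySem.Dict String (List Int)).keys
      (documents.map (fun p => p.1)) :=
    PySem.Dict.keys_foldl_modify_key documents (fun p => p.1) [] (fun _ p => (fun l => l ++ [pvParse p.2])) _
  have hkeys' : d1.keys = PySem.List.dedup (documents.map (fun p => p.1)) := by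
    rw [hkeys]; simp [PySem.Dict.keys_empty, PySem.List.dedup_eq_ofList]; rfl
  have hnodup : d1.keys.Nodup := by
    rw [hkeys']; exact PySem.List.nodup_dedup _
  have hgetD : ∀ t, d1.getD t [] = (documents.filter (fun p => p.1 == t)).map (fun p => pvParse p.2) := by
    intro t
    have hfold : d1 = (documents.map (fun p => (p.1, pvParse p.2))).foldl
        (fun d q => d.modify q.1 [] (fun l => l ++ [q.2])) PySem.Dict.empty := by
      rw [hd1, List.foldl_map]
    rw [hfold, PySem.Dict.getD_foldl_modify_append]
    simp [List.filter_map, List.map_map, Function.comp_def]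
  rw [PySem.Dict.items_eq_map_keys d1 hnodup [], hkeys']
  exact List.map_congr_left (fun t _ => by rw [hgetD t])

-- phase 2: re-inserting every key of a nodup-keyed dict maps its items in place
theorem pvFoldl_insert_items {K V : Type} [BEq K] [LawfulBEq K] [DecidableEq K] [DecidableEq V] (g : V → V) :
    ∀ (l : List (K × V)) (d : PySem.Dict K V), d.keys.Nodup → (∀ p ∈ l, p ∈ d.items) →
      (l.map Prod.fst).Nodup →
      (l.foldl (fun d' p => d'.insert p.1 (g p.2)) d).items
        = d.items.map (fun q => if q ∈ l then (q.1, g q.2) else q) := by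
  intro l
  induction l with
  | nil => intro d _ _ _; simp
  | cons p t ih =>
    intro d hnd hmem hlnd
    rw [List.map_cons] at hlnd
    have hp1_notin_t : p.1 ∉ t.map Prod.fst := (List.nodup_cons.1 hlnd).1
    have hcontains : d.contains p.1 = true := by
      have : p.1 ∈ d.keys := PySem.Dict.mem_keys_of_mem_items d (hmem p List.mem_cons_self)
      exact (PySem.Dict.contains_iff_mem_keys d p.1).2 this
    simp only [List.foldl_cons]
    set d' := d.insert p.1 (g p.2) with hd'
    have hitems' : d'.items = d.items.map (fun q => if (q.1 == p.1) = true then (p.1, g p.2) else q) :=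
      PySem.Dict.items_insert_of_contains d _ hcontains
    have hnd' : d'.keys.Nodup := PySem.Dict.nodup_keys_insert d _ _ hnd
    have hmem' : ∀ q ∈ t, q ∈ d'.items := by
      intro q hq
      have hq1 : q.1 ≠ p.1 := fun h => hp1_notin_t (h ▸ List.mem_map_of_mem hq)
      exact (PySem.Dict.mem_items_insert d _ _ q).2 (Or.inr ⟨hmem q (List.mem_cons_of_mem _ hq), hq1⟩)
    rw [ih d' hnd' hmem' (List.nodup_cons.1 hlnd).2, hitems', List.map_map]
    refine List.map_congr_left ?_
    intro q hq
    simp only [Function.comp_def]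
    by_cases hqp : q.1 = p.1
    · -- q and p share a key and both are in items: q = p
      have hq_eq_p : q = p := by
        have hkeysnd : (d.items.map Prod.fst).Nodup := by
          have : d.keys = d.items.map Prod.fst := by simp [PySem.Dict.keys]
          rwa [this] at hnd
        have hpmem := hmem p List.mem_cons_self
        -- nodup of map fst means fst is injective on members
        have := List.inj_on_of_nodup_map hkeysnd hq hpmem
        exact this hqp
      subst hq_eq_p
      simp only [beq_self_eq_true, if_true]
      have hnotmem_t : (q.1, g q.2) ∉ t := fun h => hp1_notin_t (by
        have := List.mem_map_of_mem (f := Prod.fst) h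
        simpa [← hqp] using this)
      simp [hnotmem_t, List.mem_cons]
    · have : (q.1 == p.1) = false := by simp [hqp]
      simp only [this, Bool.false_eq_true, if_false]
      have hqnep : q ≠ p := fun h => hqp (by rw [h])
      simp [List.mem_cons, hqnep]

-- ===== VERDICT (by name: the statement is the Claim_ definition above) =====
theorem combine_sections_spec : Claim_equal_combine_sections := by
  intro documents _ _
  unfold Spec_combine_sections combine_sections combine_sections_alt
  set raw := fun t => (documents.filter (fun p => p.1 == t)).map (fun p => pvParse p.2) with hraw
  set titles := PySem.List.dedup (documents.map (fun p => p.1)) with htitles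
  set d1 := documents.foldl (fun d p => d.modify p.1 [] (fun l => l ++ [pvParse p.2])) PySem.Dict.empty with hd1
  have hitems : d1.items = titles.map (fun t => (t, raw t)) := pvPhase1_items documents
  have hfstnd : (d1.items.map Prod.fst).Nodup := by
    rw [hitems, List.map_map]
    have : (Prod.fst ∘ fun t => (t, raw t)) = fun t : String => t := by funext t; rfl
    rw [this, List.map_id_fun']
    exact htitles ▸ PySem.List.nodup_dedup _
  have hknd : d1.keys.Nodup := by
    have : d1.keys = d1.items.map Prod.fst := by simp [PySem.Dict.keys]
    rw [this]; exact hfstnd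
  have h2 := pvFoldl_insert_items (fun v => expand_sections v 1) d1.items d1 hknd (fun p hp => hp) hfstnd
  rw [h2]
  refine Eq.trans (List.map_congr_left (g := fun q : String × List Int => (q.1, expand_sections q.2 1))
    (fun q hq => if_pos hq)) ?_
  rw [hitems, List.map_map]
  exact List.map_congr_left (fun t _ => by
    simp only [Function.comp_def]
    rw [pvExpand_eq_merge])
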